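-- pv_equiv track=rewrite | github.com/SahilMukadam/Smart_City_AI_Agent | app/agent/reasoning.py | _format_executor_detail
-- ===== SOURCE A (Python) =====
-- def _format_executor_detail(metadata: list[dict]) -> str:
--     if not metadata:
--         return "No tools executed"
--     cached = sum(1 for m in metadata if m.get("cached"))
--     ok = sum(1 for m in metadata if m.get("success") and not m.get("cached"))
--     failed = sum(1 for m in metadata if not m.get("success"))
--     parts = []
--     if ok:
--         parts.append(f"{ok} API call(s)")
--     if cached:
--         parts.append(f"{cached} cached")
--     if failed:
--         parts.append(f"{failed} failed")
--     return ", ".join(parts)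
-- ===== SOURCE B (Python) =====
-- def _format_executor_detail(metadata: list[dict]) -> str:
--     if not metadata:
--         return "No tools executed"
--     # Partition items into the four disjoint (cached, success) classes with one counting dict,
--     # then derive the three figures arithmetically from the class counts.
--     counts = {}
--     for m in metadata:
--         key = (bool(m.get("cached")), bool(m.get("success")))
--         counts[key] = counts.get(key, 0) + 1
--     cached = counts.get((True, True), 0) + counts.get((True, False), 0)
--     ok = counts.get((False, True), 0)
--     failed = counts.get((True, False), 0) + counts.get((False, False), 0)
--     parts = [f"{n} {label}" for n, label in ((ok, "API call(s)"), (cached, "cached"), (failed, "failed")) if n]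
--     return ", ".join(parts)
-- ===== Notes on version B (the rewrite author's own statement) =====
-- stated objective: alternative
-- what changed: replaces A's three overlapping generator-sum scans with a counting dict that partitions the items into the four disjoint (cached, success) classes in one pass and derives the three figures arithmetically from the class counts, building the parts via one comprehension
import Mathlib
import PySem

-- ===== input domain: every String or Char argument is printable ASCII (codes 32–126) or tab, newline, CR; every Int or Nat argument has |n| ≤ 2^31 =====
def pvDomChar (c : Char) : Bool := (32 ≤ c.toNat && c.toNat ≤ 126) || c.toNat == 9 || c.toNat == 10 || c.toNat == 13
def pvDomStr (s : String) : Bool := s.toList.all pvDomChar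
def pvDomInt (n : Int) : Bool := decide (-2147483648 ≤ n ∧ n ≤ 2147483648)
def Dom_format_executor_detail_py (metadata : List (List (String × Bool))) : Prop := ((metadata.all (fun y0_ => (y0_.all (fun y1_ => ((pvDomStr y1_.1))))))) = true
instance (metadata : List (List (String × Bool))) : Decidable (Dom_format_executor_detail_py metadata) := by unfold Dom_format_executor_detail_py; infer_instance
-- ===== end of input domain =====

-- B partitions the items into the four disjoint (cached, success) classes with one counting dict
-- and derives the three figures arithmetically from the class counts (objective: alternative).

-- m.get(k): first matching key in the association list, missing key → falsy (None); a Bool value's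
-- truthiness is the Bool itself.
def pvGetKey (m : List (String × Bool)) (k : String) : Bool :=
  match m.find? (fun p => p.1 == k) with
  | some p => p.2
  | none => false

-- ===== PORT A =====
def format_executor_detail_py (metadata : List (List (String × Bool))) : String :=
  if metadata = [] then "No tools executed"
  else
    let cached : Int := (metadata.map (fun m => if pvGetKey m "cached" then (1 : Int) else 0)).sum
    let ok : Int := (metadata.map (fun m => if pvGetKey m "success" && !pvGetKey m "cached" then (1 : Int) else 0)).sum
    let failed : Int := (metadata.map (fun m => if !pvGetKey m "success" then (1 : Int) else 0)).sum
    let parts : List String := []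
    let parts := if ok ≠ 0 then parts ++ [PySem.Int.toStr ok ++ " API call(s)"] else parts
    let parts := if cached ≠ 0 then parts ++ [PySem.Int.toStr cached ++ " cached"] else parts
    let parts := if failed ≠ 0 then parts ++ [PySem.Int.toStr failed ++ " failed"] else parts
    PySem.Str.join ", " parts

-- ===== PORT B =====
-- key = (bool(m.get("cached")), bool(m.get("success")))
def pvClassify (m : List (String × Bool)) : Bool × Bool :=
  (pvGetKey m "cached", pvGetKey m "success")

def format_executor_detail_py_alt (metadata : List (List (String × Bool))) : String :=
  if metadata = [] then "No tools executed"
  else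
    -- counts[key] = counts.get(key, 0) + 1 over the four disjoint classes
    let counts : PySem.Dict (Bool × Bool) Int :=
      metadata.foldl (fun d m => d.insert (pvClassify m) (d.getD (pvClassify m) 0 + 1)) PySem.Dict.empty
    let cached : Int := counts.getD (true, true) 0 + counts.getD (true, false) 0
    let ok : Int := counts.getD (false, true) 0
    let failed : Int := counts.getD (true, false) 0 + counts.getD (false, false) 0
    let parts : List String :=
      (([(ok, "API call(s)"), (cached, "cached"), (failed, "failed")] : List (Int × String)).filter
        (fun p => p.1 ≠ 0)).map (fun p => PySem.Int.toStr p.1 ++ " " ++ p.2)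
    PySem.Str.join ", " parts

-- ===== PRECONDITION & SPEC =====
def Spec_format_executor_detail_py (metadata : List (List (String × Bool))) (out : String) : Prop := out = format_executor_detail_py_alt metadata
instance (metadata : List (List (String × Bool))) (out : String) : Decidable (Spec_format_executor_detail_py metadata out) := by unfold Spec_format_executor_detail_py; infer_instance

-- ===== CLAIM (what is proved, stated in full; the proofs are below) =====
def Claim_equal_format_executor_detail_py : Prop := ∀ (metadata : List (List (String × Bool))), Dom_format_executor_detail_py metadata → Spec_format_executor_detail_py metadata (format_executor_detail_py metadata)

-- ===== LEMMAS AND PROOFS =====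

-- class counts of the disjoint partition recombine into A's three overlapping predicate counts
lemma pvCounts_eq (l : List (List (String × Bool))) :
    (l.map pvClassify).count (true, true) + (l.map pvClassify).count (true, false)
      = l.countP (fun m => pvGetKey m "cached")
    ∧ (l.map pvClassify).count (false, true)
      = l.countP (fun m => pvGetKey m "success" && !pvGetKey m "cached")
    ∧ (l.map pvClassify).count (true, false) + (l.map pvClassify).count (false, false)
      = l.countP (fun m => !pvGetKey m "success") := by
  induction l with
  | nil => simp
  | cons m t ih =>
    obtain ⟨ih1, ih2, ih3⟩ := ih
    simp only [List.map_cons, List.count_cons, List.countP_cons, pvClassify]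
    cases hc : pvGetKey m "cached" <;> cases hs : pvGetKey m "success" <;>
      simp_all <;> omega

-- f"{n} {label}" concatenations re-associated against A's literal suffixes
lemma pvJoinWord1 (o : Int) : PySem.Int.toStr o ++ " " ++ "API call(s)" = PySem.Int.toStr o ++ " API call(s)" := by
  rw [String.append_assoc]; rfl
lemma pvJoinWord2 (o : Int) : PySem.Int.toStr o ++ " " ++ "cached" = PySem.Int.toStr o ++ " cached" := by
  rw [String.append_assoc]; rfl
lemma pvJoinWord3 (o : Int) : PySem.Int.toStr o ++ " " ++ "failed" = PySem.Int.toStr o ++ " failed" := by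
  rw [String.append_assoc]; rfl

-- the comprehension over the three (count, label) pairs equals A's conditional-append chain
lemma pvParts_eq (o c f : Int) :
    ((([(o, "API call(s)"), (c, "cached"), (f, "failed")] : List (Int × String)).filter
        (fun p => p.1 ≠ 0)).map (fun p => PySem.Int.toStr p.1 ++ " " ++ p.2))
    = (let parts : List String := []
       let parts := if o ≠ 0 then parts ++ [PySem.Int.toStr o ++ " API call(s)"] else parts
       let parts := if c ≠ 0 then parts ++ [PySem.Int.toStr c ++ " cached"] else parts
       if f ≠ 0 then parts ++ [PySem.Int.toStr f ++ " failed"] else parts) := by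
  by_cases ho : o = 0 <;> by_cases hc : c = 0 <;> by_cases hf : f = 0 <;>
    simp [ho, hc, hf, pvJoinWord1, pvJoinWord2, pvJoinWord3]

theorem format_executor_detail_py_spec : Claim_equal_format_executor_detail_py := by
  intro metadata _
  unfold Spec_format_executor_detail_py format_executor_detail_py format_executor_detail_py_alt
  by_cases h : metadata = []
  · simp [h]
  · simp only [h, if_false]
    obtain ⟨h1, h2, h3⟩ := pvCounts_eq metadata
    rw [← List.foldl_map (f := pvClassify)
      (g := fun d x => PySem.Dict.insert d x (PySem.Dict.getD d x 0 + 1)) (l := metadata)]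
    simp only [PySem.Dict.getD_foldl_insert_add_one, PySem.Dict.getD_empty, zero_add,
      PySem.List.sum_map_ite_one_zero, ← h1, ← h2, ← h3, pvParts_eq]
    push_cast
    rfl
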